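-- pv_equiv track=rewrite | github.com/schlenks/superpowers-bd | tests/verification/analyze-v4.py | _count_unique_for_cycle
-- ===== SOURCE A (Python) =====
-- REAL_BUGS = [f"B{i}" for i in range(1, 13)]
--
-- def _count_unique_for_cycle(opus, sonnets):
--     """Count bugs found only by Opus and not by any Sonnet reviewer.
--
--     Returns:
--         tuple: (unique_count, list of unique bug_ids)
--     """
--     unique_bugs = []
--     for bug_id in REAL_BUGS:
--         opus_found = opus.get(bug_id, {}).get("found", False)
--         sonnet_found = any(s.get(bug_id, {}).get("found", False) for s in sonnets)
--         if opus_found and not sonnet_found: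
--             unique_bugs.append(bug_id)
--     return len(unique_bugs), unique_bugs
-- ===== SOURCE B (Python) =====
-- REAL_BUGS = [f"B{i}" for i in range(1, 13)]
--
-- def _count_unique_for_cycle(opus, sonnets):
--     """Count bugs found only by Opus and not by any Sonnet reviewer.
--
--     One up-front pass over all sonnet results collects every bug_id any
--     sonnet found; then a single pass over REAL_BUGS filters with a set
--     membership test instead of re-scanning all sonnets per bug.
--     """
--     sonnet_found = set()
--     for s in sonnets:
--         for bug_id, entry in s.items():
--             if entry.get("found", False):
--                 sonnet_found.add(bug_id)
--     unique_bugs = [b for b in REAL_BUGS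
--                    if opus.get(b, {}).get("found", False) and b not in sonnet_found]
--     return len(unique_bugs), unique_bugs
-- ===== Notes on version B (the rewrite author's own statement) =====
-- stated objective: alternative
-- what changed: The per-bug any() rescan of all sonnets is hoisted into one up-front pass that builds a set of sonnet-found bug ids; the main pass over REAL_BUGS then uses a single membership test.
import Mathlib
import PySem

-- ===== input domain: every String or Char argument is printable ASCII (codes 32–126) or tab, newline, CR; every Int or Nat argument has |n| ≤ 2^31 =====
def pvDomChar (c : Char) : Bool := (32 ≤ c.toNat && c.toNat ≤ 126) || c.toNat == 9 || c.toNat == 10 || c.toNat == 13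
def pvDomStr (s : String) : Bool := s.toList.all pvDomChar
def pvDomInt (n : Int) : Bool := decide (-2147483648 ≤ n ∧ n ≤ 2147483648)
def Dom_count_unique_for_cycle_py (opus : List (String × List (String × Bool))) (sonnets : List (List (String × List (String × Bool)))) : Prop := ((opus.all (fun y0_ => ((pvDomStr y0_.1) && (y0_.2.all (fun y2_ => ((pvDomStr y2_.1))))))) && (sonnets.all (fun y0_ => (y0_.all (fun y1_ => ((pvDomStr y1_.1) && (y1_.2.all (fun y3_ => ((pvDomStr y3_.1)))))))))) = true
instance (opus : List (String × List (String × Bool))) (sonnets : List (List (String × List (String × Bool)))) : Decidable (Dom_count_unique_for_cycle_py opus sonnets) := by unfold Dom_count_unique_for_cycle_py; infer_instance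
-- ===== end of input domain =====

-- B hoists A's per-bug any() rescan of all sonnets into one up-front pass building a set of
-- sonnet-found bug ids, then filters REAL_BUGS with a membership test (objective: alternative).

-- ===== PORT A =====
def pvRealBugs : List String :=
  (PySem.List.pyRange 1 13 1).map (fun i => "B" ++ PySem.Int.toStr i)

def count_unique_for_cycle_py (opus : List (String × List (String × Bool))) (sonnets : List (List (String × List (String × Bool)))) : Int × List String :=
  let unique_bugs := pvRealBugs.foldl (fun unique_bugs bug_id =>
    let opus_found := PySem.Dict.getD (PySem.Dict.mk (PySem.Dict.getD (PySem.Dict.mk opus) bug_id [])) "found" false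
    let sonnet_found := sonnets.any (fun s =>
      PySem.Dict.getD (PySem.Dict.mk (PySem.Dict.getD (PySem.Dict.mk s) bug_id [])) "found" false)
    if opus_found && !sonnet_found then unique_bugs ++ [bug_id] else unique_bugs) []
  ((unique_bugs.length : Int), unique_bugs)

-- ===== PORT B =====
def count_unique_for_cycle_py_alt (opus : List (String × List (String × Bool))) (sonnets : List (List (String × List (String × Bool)))) : Int × List String :=
  let sonnet_found : PySem.Set String :=
    sonnets.foldl (fun acc s =>
      s.foldl (fun acc2 kv =>
        if PySem.Dict.getD (PySem.Dict.mk kv.2) "found" false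
        then PySem.Set.add acc2 kv.1 else acc2) acc)
      PySem.Set.empty
  let unique_bugs := pvRealBugs.filter (fun b =>
    PySem.Dict.getD (PySem.Dict.mk (PySem.Dict.getD (PySem.Dict.mk opus) b [])) "found" false
      && !(PySem.Set.contains sonnet_found b))
  ((unique_bugs.length : Int), unique_bugs)

-- ===== PRECONDITION & SPEC =====
-- Pre_ excludes only association lists in `sonnets` with duplicate bug-id keys: such lists
-- encode no Python dict (dict keys are unique), so B's pass over s.items() sees shadowed
-- duplicate entries that A's first-match lookup ignores; every real Python input is admitted.
def Pre_count_unique_for_cycle_py (opus : List (String × List (String × Bool))) (sonnets : List (List (String × List (String × Bool)))) : Prop :=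
  ∀ s ∈ sonnets, (s.map Prod.fst).Nodup
instance (opus : List (String × List (String × Bool))) (sonnets : List (List (String × List (String × Bool)))) : Decidable (Pre_count_unique_for_cycle_py opus sonnets) := by unfold Pre_count_unique_for_cycle_py; infer_instance

def pvWitness_count_unique_for_cycle_py : (List (String × List (String × Bool))) × (List (List (String × List (String × Bool)))) :=
  ([("B1", [("found", true)]), ("B2", [("found", true)])],
   [[("B2", [("found", true)]), ("B3", [("found", false)])]])

def Spec_count_unique_for_cycle_py (opus : List (String × List (String × Bool))) (sonnets : List (List (String × List (String × Bool)))) (out : Int × List String) : Prop := out = count_unique_for_cycle_py_alt opus sonnets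
instance (opus : List (String × List (String × Bool))) (sonnets : List (List (String × List (String × Bool)))) (out : Int × List String) : Decidable (Spec_count_unique_for_cycle_py opus sonnets out) := by unfold Spec_count_unique_for_cycle_py; infer_instance

-- ===== CLAIM (what is proved, stated in full; the proofs are below) =====
def Claim_equal_count_unique_for_cycle_py : Prop := ∀ (opus : List (String × List (String × Bool))) (sonnets : List (List (String × List (String × Bool)))), Dom_count_unique_for_cycle_py opus sonnets → Pre_count_unique_for_cycle_py opus sonnets → Spec_count_unique_for_cycle_py opus sonnets (count_unique_for_cycle_py opus sonnets)

-- ===== LEMMAS AND PROOFS =====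

-- the "entry found" test both programs apply to an inner dict
def pvFound (e : List (String × Bool)) : Bool :=
  PySem.Dict.getD (PySem.Dict.mk e) "found" false

-- under unique keys, first-match lookup then pvFound = "some entry with this key is found"
theorem pvLookup_found (b : String) (s : List (String × List (String × Bool)))
    (h : (s.map Prod.fst).Nodup) :
    pvFound (PySem.Dict.getD (PySem.Dict.mk s) b []) =
      s.any (fun kv => kv.1 == b && pvFound kv.2) := by
  induction s with
  | nil => simp [pvFound, PySem.Dict.getD, PySem.Dict.get?]
  | cons kv rest ih =>
    simp only [List.map_cons, List.nodup_cons] at h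
    rw [PySem.Dict.getD_eq_get?_getD, PySem.Dict.get?_mk_cons]
    by_cases hb : kv.1 = b
    · subst hb
      have : rest.any (fun kv' => kv'.1 == kv.1 && pvFound kv'.2) = false := by
        simp only [List.any_eq_false]
        intro kv' hkv'
        have : kv'.1 ≠ kv.1 := fun he => h.1 (he ▸ List.mem_map_of_mem hkv')
        simp [this]
      simp [this]
    · have hne : (kv.1 == b) = false := by simp [hb]
      simp only [hne, Bool.false_and, Bool.false_or, List.any_cons, Bool.false_eq_true, if_false]
      rw [← PySem.Dict.getD_eq_get?_getD]
      exact ih h.2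

-- membership in the inner set-building pass over one sonnet
theorem pvMem_inner (x : String) (s : List (String × List (String × Bool)))
    (st : PySem.Set String) :
    (x ∈ s.foldl (fun a kv => if pvFound kv.2 then PySem.Set.add a kv.1 else a) st) ↔
      x ∈ st ∨ s.any (fun kv => kv.1 == x && pvFound kv.2) := by
  induction s generalizing st with
  | nil => simp
  | cons kv rest ih =>
    simp only [List.foldl_cons, List.any_cons]
    by_cases hf : pvFound kv.2
    · rw [if_pos hf, ih, PySem.Set.mem_add]
      constructor
      · rintro (⟨h | h⟩ | h)
        · exact Or.inl h
        · exact Or.inr (by simp [h, hf])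
        · exact Or.inr (by simp [h])
      · rintro (h | h)
        · exact Or.inl (Or.inl h)
        · rcases (by simpa using h : kv.1 = x ∧ pvFound kv.2 = true ∨
            rest.any (fun kv => kv.1 == x && pvFound kv.2) = true) with ⟨h1, _⟩ | h2
          · exact Or.inl (Or.inr h1.symm)
          · exact Or.inr h2
    · rw [if_neg hf, ih]
      constructor
      · rintro (h | h)
        · exact Or.inl h
        · exact Or.inr (by simp [h])
      · rintro (h | h)
        · exact Or.inl h
        · rcases (by simpa using h : kv.1 = x ∧ pvFound kv.2 = true ∨
            rest.any (fun kv => kv.1 == x && pvFound kv.2) = true) with ⟨_, h2⟩ | h2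
          · exact absurd h2 hf
          · exact Or.inr h2

-- membership in B's whole set = some sonnet has a found entry for x
theorem pvMem_set (x : String) (sonnets : List (List (String × List (String × Bool))))
    (st : PySem.Set String) :
    (x ∈ sonnets.foldl (fun acc s =>
        s.foldl (fun a kv => if pvFound kv.2 then PySem.Set.add a kv.1 else a) acc) st) ↔
      x ∈ st ∨ sonnets.any (fun s => s.any (fun kv => kv.1 == x && pvFound kv.2)) := by
  induction sonnets generalizing st with
  | nil => simp
  | cons s rest ih =>
    simp only [List.foldl_cons, List.any_cons]
    rw [ih, pvMem_inner]
    simp only [Bool.or_eq_true]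
    tauto

-- ===== VERDICT (by name: the statement is the Claim_ definition above) =====
theorem count_unique_for_cycle_py_spec : Claim_equal_count_unique_for_cycle_py := by
  intro opus sonnets _ hpre
  show count_unique_for_cycle_py opus sonnets = count_unique_for_cycle_py_alt opus sonnets
  unfold count_unique_for_cycle_py count_unique_for_cycle_py_alt
  simp only
  rw [PySem.List.foldl_append_if]
  simp only [List.nil_append, List.map_id']
  have key : ∀ b : String,
      (PySem.Dict.getD (PySem.Dict.mk (PySem.Dict.getD (PySem.Dict.mk opus) b [])) "found" false &&
        !sonnets.any (fun s =>
          PySem.Dict.getD (PySem.Dict.mk (PySem.Dict.getD (PySem.Dict.mk s) b [])) "found" false)) =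
      (PySem.Dict.getD (PySem.Dict.mk (PySem.Dict.getD (PySem.Dict.mk opus) b [])) "found" false &&
        !(PySem.Set.contains (sonnets.foldl (fun acc s =>
            s.foldl (fun acc2 kv =>
              if PySem.Dict.getD (PySem.Dict.mk kv.2) "found" false
              then PySem.Set.add acc2 kv.1 else acc2) acc) PySem.Set.empty) b)) := by
    intro b
    congr 1
    have h1 : sonnets.any (fun s =>
        PySem.Dict.getD (PySem.Dict.mk (PySem.Dict.getD (PySem.Dict.mk s) b [])) "found" false) =
        sonnets.any (fun s => s.any (fun kv => kv.1 == b && pvFound kv.2)) := by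
      apply PySem.List.any_congr_mem
      intro s hs
      exact pvLookup_found b s (hpre s hs)
    have h2 : PySem.Set.contains (sonnets.foldl (fun acc s =>
        s.foldl (fun a kv => if pvFound kv.2 then PySem.Set.add a kv.1 else a) acc)
        PySem.Set.empty) b =
        sonnets.any (fun s => s.any (fun kv => kv.1 == b && pvFound kv.2)) := by
      by_cases hA : (sonnets.any (fun s => s.any (fun kv => kv.1 == b && pvFound kv.2))) = true
      · rw [hA]
        exact (PySem.Set.contains_iff _ _).mpr
          ((pvMem_set b sonnets PySem.Set.empty).mpr (Or.inr hA))
      · have hA' : (sonnets.any (fun s => s.any (fun kv => kv.1 == b && pvFound kv.2))) = false := by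
          simpa using hA
        rw [hA', Bool.eq_false_iff]
        intro hc
        have hmem := (PySem.Set.contains_iff _ _).mp hc
        rcases (pvMem_set b sonnets PySem.Set.empty).mp hmem with h | h
        · simp [PySem.Set.empty] at h
        · exact hA h
    simp only [pvFound] at h1 h2
    rw [h1]
    exact congrArg Bool.not h2.symm
  exact congrArg (fun l : List String => ((l.length : Int), l)) (List.filter_congr (fun b _ => key b))
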